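-- pv_equiv track=rewrite | github.com/kpkeerthi2000/network | arp.py | proper_mac
-- ===== SOURCE A (Python) =====
-- def proper_mac(MAC_Addr):
-- 	mac = ""
-- 	count = 0
-- 	for i in range(len(MAC_Addr)):
-- 		mac = mac + chr(MAC_Addr[i])
-- 		count=count+1
-- 		if(count==2):
-- 			count=0
-- 			mac=mac+':'
-- 	return mac
-- ===== SOURCE B (Python) =====
-- def proper_mac(MAC_Addr):
--     pieces = []
--     for i in range(0, len(MAC_Addr), 2):
--         chunk = MAC_Addr[i:i+2]
--         piece = ''.join(chr(b) for b in chunk)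
--         if len(chunk) == 2:
--             piece += ':'
--         pieces.append(piece)
--     return ''.join(pieces)
-- ===== Notes on version B (the rewrite author's own statement) =====
-- stated objective: alternative
-- what changed: B iterates over 2-byte chunks (range step 2 + slice), emitting each pair's two characters plus a colon as one piece, instead of A's per-byte loop with a modular counter and string accumulator.
import Mathlib
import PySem

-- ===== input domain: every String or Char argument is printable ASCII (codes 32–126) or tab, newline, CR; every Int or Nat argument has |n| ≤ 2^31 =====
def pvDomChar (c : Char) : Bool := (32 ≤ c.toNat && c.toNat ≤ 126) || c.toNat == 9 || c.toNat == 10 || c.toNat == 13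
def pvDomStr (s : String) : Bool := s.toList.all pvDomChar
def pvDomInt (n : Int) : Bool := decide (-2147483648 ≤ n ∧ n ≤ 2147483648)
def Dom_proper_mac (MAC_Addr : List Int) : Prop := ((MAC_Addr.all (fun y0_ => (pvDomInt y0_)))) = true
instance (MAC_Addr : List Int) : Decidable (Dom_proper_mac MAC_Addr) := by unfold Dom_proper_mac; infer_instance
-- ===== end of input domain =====

-- B builds the string from 2-byte chunks (one piece per pair, colon appended to full pairs)
-- instead of A's per-byte loop with a modular counter; equal return value on Pre_.

-- chr(n): exact for the codepoints admitted by Pre_proper_mac (valid Unicode scalar values)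
def pyChr (n : Int) : Char := Char.ofNat n.toNat

-- ===== PORT A =====
def proper_mac (MAC_Addr : List Int) : String :=
  -- mac = ""; count = 0; for each byte: append chr(b), count += 1; on count == 2 append ':' and reset
  (String.mk (MAC_Addr.foldl
    (fun (st : List Char × Int) b =>
      let mac := st.1 ++ [pyChr b]
      let count := st.2 + 1
      if count = 2 then (mac ++ [':'], 0) else (mac, count))
    ([], 0)).1)

-- ===== PORT B =====
-- one piece per chunk MAC_Addr[i:i+2]: both chars plus ':' for a full pair, lone char for an odd tail
def properMacChunks : List Int → List Char
  | [] => []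
  | [b] => [pyChr b]
  | b1 :: b2 :: rest => pyChr b1 :: pyChr b2 :: ':' :: properMacChunks rest

def proper_mac_alt (MAC_Addr : List Int) : String :=
  String.mk (properMacChunks MAC_Addr)

-- ===== PRECONDITION & SPEC =====
-- Pre_ excludes exactly the inputs where chr raises ValueError (negatives and values ≥ 0x110000)
-- and the surrogate codepoints 0xD800–0xDFFF, where A returns a lone-surrogate string that is not
-- a representable Lean String (not a value of the declared type).
def Pre_proper_mac (MAC_Addr : List Int) : Prop :=
  ∀ b ∈ MAC_Addr, (0 ≤ b ∧ b < 55296) ∨ (57344 ≤ b ∧ b < 1114112)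
instance (MAC_Addr : List Int) : Decidable (Pre_proper_mac MAC_Addr) := by unfold Pre_proper_mac; infer_instance

def pvWitness_proper_mac : List Int := [0, 66, 128512, 67, 68]

def Spec_proper_mac (MAC_Addr : List Int) (out : String) : Prop := out = proper_mac_alt MAC_Addr
instance (MAC_Addr : List Int) (out : String) : Decidable (Spec_proper_mac MAC_Addr out) := by unfold Spec_proper_mac; infer_instance

-- ===== CLAIM (what is proved, stated in full; the proofs are below) =====
def Claim_equal_proper_mac : Prop := ∀ (MAC_Addr : List Int), Dom_proper_mac MAC_Addr → Pre_proper_mac MAC_Addr → Spec_proper_mac MAC_Addr (proper_mac MAC_Addr)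

-- ===== LEMMAS AND PROOFS =====

-- loop invariant for A's fold at count = 0: it appends exactly B's chunk rendering
theorem proper_mac_fold_eq (l : List Int) :
    ∀ acc : List Char,
      (l.foldl
        (fun (st : List Char × Int) b =>
          let mac := st.1 ++ [pyChr b]
          let count := st.2 + 1
          if count = 2 then (mac ++ [':'], 0) else (mac, count))
        (acc, 0)).1 = acc ++ properMacChunks l := by
  induction l using properMacChunks.induct with
  | case1 => simp [properMacChunks]
  | case2 b => intro acc; simp [properMacChunks]
  | case3 b1 b2 rest ih =>
      intro acc
      rw [show (b1 :: b2 :: rest) = [b1, b2] ++ rest from rfl, List.foldl_append]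
      have h2 : List.foldl
          (fun (st : List Char × Int) b =>
            let mac := st.1 ++ [pyChr b]
            let count := st.2 + 1
            if count = 2 then (mac ++ [':'], 0) else (mac, count))
          (acc, 0) [b1, b2] = (acc ++ [pyChr b1, pyChr b2, ':'], 0) := by
        simp
      rw [h2, ih]
      simp [properMacChunks]

-- ===== VERDICT (by name: the statement is the Claim_ definition above) =====
theorem proper_mac_spec : Claim_equal_proper_mac := by
  intro MAC_Addr _ _
  unfold Spec_proper_mac proper_mac proper_mac_alt
  rw [proper_mac_fold_eq MAC_Addr []]
  simp
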